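-- pv_equiv track=rewrite | github.com/danyaklimov/coursework | data.py | get_clique
-- ===== SOURCE A (Python) =====
-- def get_clique(nodes, edges) -> list:
--     nodes = list(nodes)
--     edges = list(edges)
--     clique_list = []
--
--     counter = 0
--     for node in nodes:
--         if all([True if node in edge else False for edge in edges]):
--             clique_list.append(node)
--             counter += 1
--
--     if counter < 2:
--         return []
--     return clique_list
-- ===== SOURCE B (Python) =====
-- def get_clique(nodes, edges):
--     inter = None
--     for edge in edges:
--         s = set(edge)
--         inter = s if inter is None else inter & s
--     clique = list(nodes) if inter is None else [n for n in nodes if n in inter]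
--     return clique if len(clique) >= 2 else []
-- ===== Notes on version B (the rewrite author's own statement) =====
-- stated objective: faster
-- what changed: Replaces the per-node scan over every edge by folding all edges into one intersection set first, then a single filtering pass over nodes.
import Mathlib
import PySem

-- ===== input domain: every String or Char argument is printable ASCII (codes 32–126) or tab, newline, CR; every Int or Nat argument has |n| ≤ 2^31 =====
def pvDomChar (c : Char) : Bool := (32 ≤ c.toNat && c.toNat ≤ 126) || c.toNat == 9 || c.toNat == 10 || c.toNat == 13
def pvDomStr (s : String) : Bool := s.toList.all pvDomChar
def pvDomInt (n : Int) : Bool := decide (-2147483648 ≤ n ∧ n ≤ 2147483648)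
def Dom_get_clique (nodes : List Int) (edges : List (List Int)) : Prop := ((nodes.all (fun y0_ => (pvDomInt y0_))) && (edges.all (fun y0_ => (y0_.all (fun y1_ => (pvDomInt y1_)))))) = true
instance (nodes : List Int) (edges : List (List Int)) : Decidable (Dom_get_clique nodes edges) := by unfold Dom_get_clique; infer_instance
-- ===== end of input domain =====

-- ===== PORT A =====
-- B folds the edges into one intersection set, then filters nodes in a single pass (idiomatic restructuring).
def get_clique (nodes : List Int) (edges : List (List Int)) : List Int :=
  let r := nodes.foldl (fun (st : List Int × Int) node =>
    if ((edges.map (fun edge => if edge.contains node then true else false)).all (fun b => b))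
    then (st.1 ++ [node], st.2 + 1) else st) ([], 0)
  if r.2 < 2 then [] else r.1

-- ===== PORT B =====
def get_clique_alt (nodes : List Int) (edges : List (List Int)) : List Int :=
  let inter : Option (PySem.Set Int) := edges.foldl (fun acc edge =>
    match acc with
    | none => some (PySem.Set.ofList edge)
    | some s => some (PySem.Set.inter s (PySem.Set.ofList edge))) none
  let clique : List Int := match inter with
    | none => nodes
    | some s => nodes.filter (fun n => PySem.Set.contains s n)
  if 2 ≤ clique.length then clique else []

-- ===== PRECONDITION & SPEC =====
def Spec_get_clique (nodes : List Int) (edges : List (List Int)) (out : List Int) : Prop := out = get_clique_alt nodes edges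
instance (nodes : List Int) (edges : List (List Int)) (out : List Int) : Decidable (Spec_get_clique nodes edges out) := by unfold Spec_get_clique; infer_instance

-- ===== CLAIM (what is proved, stated in full; the proofs are below) =====
def Claim_equal_get_clique : Prop := ∀ (nodes : List Int) (edges : List (List Int)), Dom_get_clique nodes edges → Spec_get_clique nodes edges (get_clique nodes edges)

-- ===== LEMMAS AND PROOFS =====

lemma gc_loop (edges : List (List Int)) (nodes acc : List Int) (c : Int) :
    nodes.foldl (fun (st : List Int × Int) node =>
      if ((edges.map (fun edge => if edge.contains node then true else false)).all (fun b => b))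
      then (st.1 ++ [node], st.2 + 1) else st) (acc, c)
    = (acc ++ nodes.filter (fun node => (edges.map (fun edge => if edge.contains node then true else false)).all (fun b => b)),
       c + (nodes.filter (fun node => (edges.map (fun edge => if edge.contains node then true else false)).all (fun b => b))).length) := by
  induction nodes generalizing acc c with
  | nil => simp
  | cons n ns ih =>
    rw [List.foldl_cons, List.filter_cons]
    by_cases h : ((edges.map (fun edge => if edge.contains n then true else false)).all (fun b => b)) = true
    · rw [if_pos h, if_pos h, ih]
      refine Prod.ext ?_ ?_
      · simp
      · simp only [List.length_cons]; push_cast; ring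
    · rw [if_neg h, if_neg h, ih]

lemma gc_pred (edges : List (List Int)) (n : Int) :
    ((edges.map (fun edge => if edge.contains n then true else false)).all (fun b => b))
    = edges.all (fun e => e.contains n) := by
  induction edges with
  | nil => rfl
  | cons e es ih =>
    simp only [List.map_cons, List.all_cons, ih]
    cases e.contains n <;> simp

lemma gc_inter_mem (es : List (List Int)) (s : PySem.Set Int) (x : Int) :
    x ∈ es.foldl (fun t e => PySem.Set.inter t (PySem.Set.ofList e)) s ↔ (x ∈ s ∧ ∀ e ∈ es, x ∈ e) := by
  induction es generalizing s with
  | nil => simp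
  | cons e es ih =>
    simp only [List.foldl_cons, ih, PySem.Set.mem_inter, PySem.Set.mem_ofList, List.mem_cons]
    constructor
    · rintro ⟨⟨hs, he⟩, h⟩; exact ⟨hs, fun e' h' => h'.elim (fun hh => hh ▸ he) (h e')⟩
    · rintro ⟨hs, h⟩; exact ⟨⟨hs, h e (Or.inl rfl)⟩, fun e' h' => h e' (Or.inr h')⟩

lemma gc_fold_some (es : List (List Int)) (s : PySem.Set Int) :
    es.foldl (fun (acc : Option (PySem.Set Int)) edge =>
      match acc with
      | none => some (PySem.Set.ofList edge)
      | some s => some (PySem.Set.inter s (PySem.Set.ofList edge))) (some s)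
    = some (es.foldl (fun t e => PySem.Set.inter t (PySem.Set.ofList e)) s) := by
  induction es generalizing s with
  | nil => rfl
  | cons e es ih => simp [ih]

-- ===== VERDICT (by name: the statement is the Claim_ definition above) =====
theorem get_clique_spec : Claim_equal_get_clique := by
  intro nodes edges _
  unfold Spec_get_clique get_clique get_clique_alt
  rw [gc_loop]
  cases edges with
  | nil =>
    simp only [List.map_nil, List.all_nil, List.foldl_nil, List.filter_true, List.nil_append, zero_add]
    split_ifs with h1 h2 <;> first | rfl | omega
  | cons e es =>
    simp only [List.foldl_cons, gc_fold_some]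
    have hfilt : (nodes.filter (fun node => (((e :: es).map (fun edge => if edge.contains node then true else false)).all (fun b => b))))
        = nodes.filter (fun n => PySem.Set.contains (es.foldl (fun t e => PySem.Set.inter t (PySem.Set.ofList e)) (PySem.Set.ofList e)) n) := by
      apply List.filter_congr
      intro n _
      rw [gc_pred, PySem.Set.contains_eq_decide, Bool.eq_iff_iff]
      simp only [List.all_eq_true, decide_eq_true_eq, gc_inter_mem, PySem.Set.mem_ofList,
        List.mem_cons, List.contains_iff_mem]
      constructor
      · intro h; exact ⟨h e (Or.inl rfl), fun e' he' => h e' (Or.inr he')⟩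
      · rintro ⟨h1, h2⟩ e' he'; rcases he' with rfl | he' 
        · exact h1
        · exact h2 e' he'
    rw [hfilt]
    simp only [List.nil_append]
    split_ifs with h1 h2 <;> try rfl
    · omega
    · omega
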